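-- pv_equiv track=rewrite | github.com/gurban-dev/python | ron/mmn13/shift_right_size.py | shift_right_size
-- ===== SOURCE A (Python) =====
-- def shift_k_right(lst, k):
--     """
--     Returns a new list which is the result of a
--     right circular shift of size "k" on the input
--     list "lst".
--
--     A right circular shift moves each element in
--     the list to the right by "k" positions, wrapping
--     elements around to the front as needed.
--
--     Parameters
--     ----------
--     lst : list
--         A list of elements to be shifted.
--
--     k : int
--         The number of positions to shift elements
--         to the right.
--
--     Returns
--     -------
--     list
--         A new list that is the result of a right
--         circular shift of "lst" by "k" positions.
--
--     Raises
--     ------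
--     ValueError
--         If "k" is negative or greater than the
--         length of the list.
--     """
--     length = len(lst)
--
--     # Validate input: "k" must be within range.
--     if k < 0 or k > length:
--         raise ValueError(
--             "Shift value k must be between 0 "
--             "and the length of the list.")
--
--     # Perform the shift using slicing.
--     return lst[-k:] + lst[:-k]
--
-- def shift_right_size(a, b):
--     """
--     Determines the right circular shift size "k" such
--     that shifting list a by "k" positions results in
--     list "b".
--
--     Uses the shift_k_right() function to attempt each
--     valid shift size from 0 up to the length of the
--     list.
--
--     Parameters
--     ----------
--     a : list
--         The original list to be shifted.
--
--     b : list
--         The target list to match after shifting.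
--
--     Returns
--     -------
--     int or None
--         The shift size "k" that makes a equal to "b"
--         after a right circular shift.
--
--         Returns None if no such shift exists or if the
--         lists are not the same length.
--     """
--     # Check if lists are of the same length.
--     if len(a) != len(b):
--         return None
--
--     # Try each possible shift value from 0 to len(a).
--     for k in range(len(a) + 1):
--         shifted = shift_k_right(a, k)
--
--         if shifted == b:
--             return k
--
--     # No shift results in list a matching list b.
--     return None
-- ===== SOURCE B (Python) =====
-- def shift_right_size(a, b):
--     # A right circular shift of a by k makes b exactly when a == b[k:] + b[:k],
--     # i.e. a occurs at index k in b doubled.  Find the first occurrence of the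
--     # pattern a in the text b + b[:n-1] with Knuth-Morris-Pratt in O(n) time,
--     # instead of building and comparing every rotation (O(n^2)).
--     if len(a) != len(b):
--         return None
--     n = len(a)
--     if n == 0:
--         return 0
--     # failure function of a: pi[i] = length of the longest proper border of a[:i+1]
--     pi = [0]
--     j = 0
--     for i in range(1, n):
--         while j > 0 and a[i] != a[j]:
--             j = pi[j - 1]
--         if a[i] == a[j]:
--             j += 1
--         pi.append(j)
--     # scan the doubled text; a match ending at i starts at i - n + 1
--     t = b + b[:n - 1]
--     j = 0
--     for i in range(len(t)):
--         while j > 0 and t[i] != a[j]: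
--             j = pi[j - 1]
--         if t[i] == a[j]:
--             j += 1
--         if j == n:
--             return i - n + 1
--     return None
-- ===== Notes on version B (the rewrite author's own statement) =====
-- stated objective: faster
-- what changed: Instead of building every rotated copy of a and comparing it to b (A), B runs Knuth-Morris-Pratt: it computes the failure function of the pattern a and scans the doubled text b + b[:n-1] once, returning the index of the first occurrence, which is exactly the smallest shift size.
import Mathlib
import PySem

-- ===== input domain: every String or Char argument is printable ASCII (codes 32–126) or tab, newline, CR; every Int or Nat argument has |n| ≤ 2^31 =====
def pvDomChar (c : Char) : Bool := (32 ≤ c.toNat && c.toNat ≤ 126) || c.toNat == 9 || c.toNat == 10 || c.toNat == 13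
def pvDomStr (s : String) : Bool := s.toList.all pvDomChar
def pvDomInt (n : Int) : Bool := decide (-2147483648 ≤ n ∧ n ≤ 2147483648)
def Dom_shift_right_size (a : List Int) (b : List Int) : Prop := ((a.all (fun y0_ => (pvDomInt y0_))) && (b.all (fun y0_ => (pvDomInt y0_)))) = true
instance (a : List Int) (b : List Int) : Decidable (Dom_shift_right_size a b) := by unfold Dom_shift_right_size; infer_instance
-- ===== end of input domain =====

-- B replaces A's build-and-compare of every rotation (quadratic) by a Knuth-Morris-Pratt
-- search for the pattern a in the doubled text b + b[:n-1] (linear); return value only.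


-- ===== PORT A =====
-- helper: Python's shift_k_right (ValueError -> none)
def shift_k_right (lst : List Int) (k : Int) : Option (List Int) :=
  let length : Int := lst.length
  if k < 0 ∨ k > length then none
  else some (PySem.List.slice lst (some (-k)) none ++ PySem.List.slice lst none (some (-k)))

-- the 'for k in range(len(a)+1)' loop of A (a raised ValueError would propagate as none)
def pyLoopA (a b : List Int) : List Int → Option Int
  | [] => none
  | k :: ks =>
    match shift_k_right a k with
    | none => none
    | some shifted => if shifted = b then some k else pyLoopA a b ks

def shift_right_size (a : List Int) (b : List Int) : Option Int :=
  if a.length ≠ b.length then none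
  else pyLoopA a b (PySem.List.pyRange 0 ((a.length : Int) + 1) 1)

-- ===== PORT B =====
-- the 'while j > 0 and c != a[j]: j = pi[j-1]' loop; fuel = initial j (the chain
-- pi[j-1] < j is strictly decreasing on every reachable state, so fuel j suffices;
-- indices are in range on every reachable state, so getD's default is never read)
def kmpFall (a : List Int) (pi : List Nat) (c : Int) : Nat → Nat → Nat
  | 0, j => j
  | fuel+1, j =>
    if 0 < j ∧ ¬ c = a.getD j 0 then kmpFall a pi c fuel (pi.getD (j-1) 0) else j

-- the shared loop body: fall back, then 'if c == a[j]: j += 1'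
def kmpStep (a : List Int) (pi : List Nat) (c : Int) (j : Nat) : Nat :=
  let r := kmpFall a pi c j j
  if c = a.getD r 0 then r + 1 else r

-- 'for i in range(1, n): … pi.append(j)' — builds the failure function of a
def kmpBuild (a : List Int) (pi : List Nat) (j : Nat) : List Int → List Nat
  | [] => pi
  | c :: cs =>
    let j' := kmpStep a pi c j
    kmpBuild a (pi ++ [j']) j' cs

-- 'for i in range(len(t)): … if j == n: return i - n + 1' — scans the doubled text
def kmpScan (a : List Int) (pi : List Nat) (n : Nat) : Nat → Nat → List Int → Option Int
  | _, _, [] => none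
  | i, j, c :: cs =>
    let j' := kmpStep a pi c j
    if j' = n then some ((i : Int) - (n : Int) + 1)
    else kmpScan a pi n (i+1) j' cs

def shift_right_size_alt (a : List Int) (b : List Int) : Option Int :=
  if a.length ≠ b.length then none
  else if a.length = 0 then some 0
  else
    let n := a.length
    let pi := kmpBuild a [0] 0 (a.drop 1)
    -- b[:n-1] with n ≥ 1: a plain prefix, exactly List.take (n-1)
    let t := b ++ b.take (n - 1)
    kmpScan a pi n 0 0 t

-- ===== PRECONDITION & SPEC =====
def Spec_shift_right_size (a : List Int) (b : List Int) (out : Option Int) : Prop := out = shift_right_size_alt a b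
instance (a : List Int) (b : List Int) (out : Option Int) : Decidable (Spec_shift_right_size a b out) := by unfold Spec_shift_right_size; infer_instance

-- ===== CLAIM (what is proved, stated in full; the proofs are below) =====
def Claim_equal_shift_right_size : Prop := ∀ (a : List Int) (b : List Int), Dom_shift_right_size a b → Spec_shift_right_size a b (shift_right_size a b)

-- ===== LEMMAS AND PROOFS =====

-- kmpM a s cap = the length of the longest prefix of a (of length ≤ cap) that is a suffix of s
def kmpM (a s : List Int) (cap : Nat) : Nat :=
  Nat.findGreatest (fun l => a.take l <:+ s) cap

lemma findGreatest_eq_of {P : Nat → Prop} [DecidablePred P] {cap v : Nat}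
    (hv : P v) (hle : v ≤ cap) (hmax : ∀ m, m ≤ cap → P m → m ≤ v) :
    Nat.findGreatest P cap = v :=
  le_antisymm (hmax _ (Nat.findGreatest_le cap) (Nat.findGreatest_spec hle hv))
    (Nat.le_findGreatest hle hv)

lemma suffix_snoc (x y : List Int) (u v : Int) : x ++ [u] <:+ y ++ [v] ↔ u = v ∧ x <:+ y := by
  rw [← List.reverse_prefix]
  simp [List.cons_prefix_cons, List.reverse_prefix]

lemma take_snoc (x : List Int) (l : Nat) (h : l < x.length) :
    x.take (l+1) = x.take l ++ [x[l]] := by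
  rw [List.take_add_one]
  simp [List.getElem?_eq_getElem h]

lemma cand_snoc (a s : List Int) (c : Int) (l : Nat) (h : l < a.length) :
    (a.take (l+1) <:+ s ++ [c]) ↔ (a.take l <:+ s ∧ c = a[l]) := by
  rw [take_snoc a l h, suffix_snoc]
  exact ⟨fun ⟨h1, h2⟩ => ⟨h2, h1.symm⟩, fun ⟨h1, h2⟩ => ⟨h2.symm, h1⟩⟩

lemma fall_spec (a : List Int) (pi : List Nat) (c : Int) (s : List Int) (cap : Nat)
    (hpi : ∀ k, k < cap → pi.getD k 0 = kmpM a (a.take (k+1)) k) :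
    ∀ fuel j, j ≤ fuel → a.take j <:+ s → j ≤ cap →
      (∀ l, l ≤ cap → a.take l <:+ s → c = a.getD l 0 → l ≤ j) →
      (a.take (kmpFall a pi c fuel j) <:+ s) ∧ kmpFall a pi c fuel j ≤ cap ∧
      (kmpFall a pi c fuel j = 0 ∨ c = a.getD (kmpFall a pi c fuel j) 0) ∧
      (∀ l, l ≤ cap → a.take l <:+ s → c = a.getD l 0 → l ≤ kmpFall a pi c fuel j) := by
  intro fuel
  induction fuel with
  | zero =>
    intro j hj hcand hjcap hmax
    have hj0 : j = 0 := by omega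
    subst hj0
    exact ⟨hcand, hjcap, Or.inl rfl, hmax⟩
  | succ fuel ih =>
    intro j hjf hcand hjcap hmax
    simp only [kmpFall]
    by_cases hif : 0 < j ∧ ¬ c = a.getD j 0
    · rw [if_pos hif]
      have hj1 : j - 1 < cap := by omega
      have hpieq : pi.getD (j-1) 0 = kmpM a (a.take (j-1+1)) (j-1) := hpi _ hj1
      have hj1' : j - 1 + 1 = j := by omega
      rw [hj1'] at hpieq
      have hP0 : a.take 0 <:+ a.take j := by simp
      have hc1 : a.take (pi.getD (j-1) 0) <:+ a.take j := by
        rw [hpieq]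
        exact Nat.findGreatest_spec (P := fun l => a.take l <:+ a.take j) (Nat.zero_le _) hP0
      have hle' : pi.getD (j-1) 0 ≤ j - 1 := by
        rw [hpieq]; exact Nat.findGreatest_le (P := fun l => a.take l <:+ a.take j) _
      apply ih (pi.getD (j-1) 0) (by omega) (hc1.trans hcand) (by omega)
      intro l hl hls hcl
      have hlj : l ≤ j := hmax l hl hls hcl
      have hlne : l ≠ j := by
        intro h; subst h; exact hif.2 hcl
      have hlj1 : l ≤ j - 1 := by omega
      -- a.take l is a suffix of a.take j
      have hsuf : a.take l <:+ a.take j := by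
        apply List.suffix_of_suffix_length_le hls hcand
        simp; omega
      rw [hpieq]
      exact Nat.le_findGreatest (P := fun l => a.take l <:+ a.take j) hlj1 hsuf
    · rw [if_neg hif]
      push Not at hif
      refine ⟨hcand, hjcap, ?_, hmax⟩
      by_cases hj0 : j = 0
      · exact Or.inl hj0
      · exact Or.inr (hif (by omega))

lemma step_spec (a : List Int) (pi : List Nat) (c : Int) (s : List Int) (cap j0 : Nat)
    (hcap : cap + 1 ≤ a.length)
    (hpi : ∀ k, k < cap → pi.getD k 0 = kmpM a (a.take (k+1)) k)
    (hcand : a.take j0 <:+ s) (hj0 : j0 ≤ cap)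
    (hdom : ∀ l, l ≤ cap → a.take l <:+ s → l ≤ j0) :
    kmpStep a pi c j0 = kmpM a (s ++ [c]) (cap+1) := by
  obtain ⟨hrc, hrcap, hrd, hrmax⟩ :=
    fall_spec a pi c s cap hpi j0 j0 le_rfl hcand hj0 (fun l hl hc _ => hdom l hl hc)
  simp only [kmpStep]
  set r := kmpFall a pi c j0 j0 with hr
  have hrlt : r < a.length := by omega
  by_cases hc : c = a.getD r 0
  · rw [if_pos hc]
    symm
    apply findGreatest_eq_of (P := fun l => a.take l <:+ s ++ [c])
    · rw [cand_snoc a s c r hrlt]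
      exact ⟨hrc, by rwa [List.getD_eq_getElem a 0 hrlt] at hc⟩
    · omega
    · intro m hm hPm
      match m with
      | 0 => omega
      | l+1 =>
        have hllt : l < a.length := by omega
        rw [cand_snoc a s c l hllt] at hPm
        have := hrmax l (by omega) hPm.1 (by rw [List.getD_eq_getElem a 0 hllt]; exact hPm.2)
        omega
  · rw [if_neg hc]
    have hr0 : r = 0 := by
      rcases hrd with h | h
      · exact h
      · exact absurd h hc
    rw [hr0]
    symm
    apply findGreatest_eq_of (P := fun l => a.take l <:+ s ++ [c])
    · simp
    · omega
    · intro m hm hPm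
      match m with
      | 0 => omega
      | l+1 =>
        have hllt : l < a.length := by omega
        rw [cand_snoc a s c l hllt] at hPm
        have hl0 := hrmax l (by omega) hPm.1 (by rw [List.getD_eq_getElem a 0 hllt]; exact hPm.2)
        have : l = 0 := by omega
        subst this
        have hg : a.getD r 0 = a[0]'(by omega) := by
          rw [hr0]; exact List.getD_eq_getElem a 0 (by omega)
        exact absurd (by rw [hg]; exact hPm.2) hc

lemma build_spec (a : List Int) :
    ∀ (cs : List Int) (i : Nat) (pi : List Nat) (j : Nat),
      1 ≤ i → cs = a.drop i → pi.length = i →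
      (∀ k, k < i → pi.getD k 0 = kmpM a (a.take (k+1)) k) →
      j = kmpM a (a.take i) (i-1) →
      ∀ k, k < a.length → (kmpBuild a pi j cs).getD k 0 = kmpM a (a.take (k+1)) k := by
  intro cs
  induction cs with
  | nil =>
    intro i pi j h1 hcs hlen hinv hj k hk
    simp only [kmpBuild]
    have : a.length ≤ i := by
      have := List.drop_eq_nil_iff.mp hcs.symm
      omega
    exact hinv k (by omega)
  | cons c cs ih =>
    intro i pi j h1 hcs hlen hinv hj k hk
    have hi : i < a.length := by
      by_contra h
      rw [List.drop_eq_nil_of_le (by omega)] at hcs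
      exact absurd hcs (by simp)
    have hdrop : a.drop i = a[i] :: a.drop (i+1) := List.drop_eq_getElem_cons hi
    rw [hdrop] at hcs
    obtain ⟨hceq, hcseq⟩ : c = a[i] ∧ cs = a.drop (i+1) := by
      constructor
      · exact (List.cons.injEq _ _ _ _ ▸ hcs).1
      · exact (List.cons.injEq _ _ _ _ ▸ hcs).2
    have hstep : kmpStep a pi c j = kmpM a (a.take (i+1)) i := by
      have h := step_spec a pi c (a.take i) (i-1) j (by omega)
        (fun k hk => hinv k (by omega))
        (by rw [hj]
            exact Nat.findGreatest_spec (P := fun l => a.take l <:+ a.take i) (Nat.zero_le _)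
              (by simp))
        (by rw [hj]; exact Nat.findGreatest_le (P := fun l => a.take l <:+ a.take i) _)
        (fun l hl hls => by
          rw [hj]; exact Nat.le_findGreatest (P := fun l => a.take l <:+ a.take i) hl hls)
      rw [h]
      have h2 : i - 1 + 1 = i := by omega
      have ht : a.take i ++ [c] = a.take (i+1) := by
        rw [hceq]; exact (take_snoc a i hi).symm
      rw [h2, ht]
    simp only [kmpBuild]
    rw [hstep]
    apply ih (i+1) (pi ++ [kmpM a (a.take (i+1)) i]) _ (by omega) hcseq (by simp [hlen])
      ?_ rfl k hk
    intro k' hk'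
    by_cases hki : k' < i
    · rw [List.getD_append _ _ _ _ (by omega)]
      exact hinv k' hki
    · have : k' = i := by omega
      subst this
      rw [List.getD_append_right _ _ _ _ (by omega), hlen]
      simp

lemma scan_spec (a : List Int) (pi : List Nat) (t : List Int)
    (hn : 1 ≤ a.length)
    (hpi : ∀ k, k < a.length → pi.getD k 0 = kmpM a (a.take (k+1)) k) :
    ∀ (cs : List Int) (i j : Nat),
      cs = t.drop i → i ≤ t.length →
      j = kmpM a (t.take i) (a.length - 1) →
      (∀ i', i' ≤ i → ¬ a <:+ t.take i') →
      (kmpScan a pi a.length i j cs = none ∧ ∀ i', i' ≤ t.length → ¬ a <:+ t.take i') ∨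
      (∃ m : Nat, i ≤ m ∧ m < t.length ∧
        kmpScan a pi a.length i j cs = some ((m : Int) - (a.length : Int) + 1) ∧
        a <:+ t.take (m+1) ∧ ∀ i', i' ≤ m → ¬ a <:+ t.take i') := by
  intro cs
  induction cs with
  | nil =>
    intro i j hcs hile hj hno
    left
    refine ⟨rfl, ?_⟩
    have : t.length ≤ i := by
      have := List.drop_eq_nil_iff.mp hcs.symm
      omega
    intro i' hi'
    exact hno i' (by omega)
  | cons c cs ih =>
    intro i j hcs hile hj hno
    have hi : i < t.length := by
      by_contra h
      rw [List.drop_eq_nil_of_le (by omega)] at hcs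
      exact absurd hcs (by simp)
    have hdrop : t.drop i = t[i] :: t.drop (i+1) := List.drop_eq_getElem_cons hi
    rw [hdrop] at hcs
    have hceq : c = t[i] := (List.cons.injEq _ _ _ _ ▸ hcs).1
    have hcseq : cs = t.drop (i+1) := (List.cons.injEq _ _ _ _ ▸ hcs).2
    have hstep : kmpStep a pi c j = kmpM a (t.take (i+1)) a.length := by
      have h := step_spec a pi c (t.take i) (a.length - 1) j (by omega)
        (fun k hk => hpi k (by omega))
        (by rw [hj]
            exact Nat.findGreatest_spec (P := fun l => a.take l <:+ t.take i) (Nat.zero_le _)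
              (by simp))
        (by rw [hj]; exact Nat.findGreatest_le (P := fun l => a.take l <:+ t.take i) _)
        (fun l hl hls => by
          rw [hj]; exact Nat.le_findGreatest (P := fun l => a.take l <:+ t.take i) hl hls)
      rw [h]
      have h2 : a.length - 1 + 1 = a.length := by omega
      have ht : t.take i ++ [c] = t.take (i+1) := by
        rw [hceq]; exact (take_snoc t i hi).symm
      rw [h2, ht]
    simp only [kmpScan]
    rw [hstep]
    by_cases hfin : kmpM a (t.take (i+1)) a.length = a.length
    · rw [if_pos hfin]
      right
      refine ⟨i, le_rfl, hi, rfl, ?_, hno⟩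
      have hP := Nat.findGreatest_spec (P := fun l => a.take l <:+ t.take (i+1))
        (n := a.length) (Nat.zero_le _) (by simp : a.take 0 <:+ t.take (i+1))
      rw [show Nat.findGreatest (fun l => a.take l <:+ t.take (i+1)) a.length
            = kmpM a (t.take (i+1)) a.length from rfl, hfin] at hP
      rwa [List.take_length] at hP
    · rw [if_neg hfin]
      have hnocc : ¬ a <:+ t.take (i+1) := by
        intro hocc
        have : a.length ≤ kmpM a (t.take (i+1)) a.length :=
          Nat.le_findGreatest (P := fun l => a.take l <:+ t.take (i+1)) le_rfl
            (by simpa using hocc)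
        have : kmpM a (t.take (i+1)) a.length ≤ a.length :=
          Nat.findGreatest_le (P := fun l => a.take l <:+ t.take (i+1)) _
        omega
      have hsucc : kmpM a (t.take (i+1)) a.length = kmpM a (t.take (i+1)) (a.length - 1) := by
        have h2 : a.length - 1 + 1 = a.length := by omega
        rw [← h2]
        rw [show kmpM a (t.take (i+1)) (a.length - 1 + 1)
              = Nat.findGreatest (fun l => a.take l <:+ t.take (i+1)) (a.length - 1 + 1) from rfl,
           Nat.findGreatest_succ]
        rw [if_neg (by simp only [h2]; simpa using hnocc)]
        rfl
      rw [hsucc]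
      have hres := ih (i+1) (kmpM a (t.take (i+1)) (a.length - 1)) hcseq (by omega) rfl
        (by intro i' hi'
            by_cases h : i' ≤ i
            · exact hno i' h
            · have : i' = i + 1 := by omega
              subst this; exact hnocc)
      rcases hres with ⟨h1, h2⟩ | ⟨m, hm1, hm2, hm3, hm4, hm5⟩
      · left; exact ⟨h1, h2⟩
      · right; exact ⟨m, by omega, hm2, hm3, hm4, hm5⟩

lemma occ_iff (a b : List Int) (hb : a.length = b.length) (k : Nat) (hk : k < a.length) :
    a <:+ (b ++ b.take (a.length - 1)).take (k + a.length) ↔ b.drop k ++ b.take k = a := by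
  have h1 : (b ++ b.take (a.length - 1)).take (k + a.length) = b ++ b.take k := by
    rw [List.take_append]
    congr 1
    · exact List.take_of_length_le (by omega)
    · rw [List.take_take]
      congr 1
      omega
  rw [h1, List.suffix_iff_eq_drop]
  have hlen : (b ++ b.take k).length = a.length + k := by
    simp
    omega
  rw [hlen]
  have h2 : a.length + k - a.length = k := by omega
  rw [h2]
  have h3 : (b ++ b.take k).drop k = b.drop k ++ b.take k := by
    rw [List.drop_append]
    congr 1
    rw [show k - b.length = 0 by omega, List.drop_zero]
  rw [h3]
  exact eq_comm

lemma find?_range_eq_some (p : Nat → Bool) (n k : Nat) (hk : k < n) (hp : p k = true)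
    (hmin : ∀ j, j < k → p j = false) : (List.range n).find? p = some k := by
  induction n with
  | zero => omega
  | succ n ih =>
    rw [List.range_succ, List.find?_append]
    by_cases h : k < n
    · rw [ih h]
      rfl
    · have hkn : k = n := by omega
      subst hkn
      have hnone : (List.range k).find? p = none := by
        rw [List.find?_eq_none]
        intro x hx
        rw [hmin x (List.mem_range.mp hx)]
        simp
      rw [hnone]
      simp [List.find?, hp]

lemma alt_eq_find (a b : List Int) (hb : a.length = b.length) (hn : 1 ≤ a.length) :
    shift_right_size_alt a b
      = ((List.range a.length).find? (fun k => decide (b.drop k ++ b.take k = a))).map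
          (fun k => (k : Int)) := by
  unfold shift_right_size_alt
  rw [if_neg (by omega), if_neg (by omega)]
  dsimp only
  have hpi : ∀ k, k < a.length →
      (kmpBuild a [0] 0 (a.drop 1)).getD k 0 = kmpM a (a.take (k+1)) k := by
    apply build_spec a (a.drop 1) 1 [0] 0 le_rfl rfl rfl
    · intro k hk
      have hk0 : k = 0 := by omega
      subst hk0
      simp [kmpM]
    · simp [kmpM]
  set t := b ++ b.take (a.length - 1) with ht
  have htlen : t.length = 2 * a.length - 1 := by
    rw [ht]
    simp
    omega
  have hj0 : kmpM a (t.take 0) (a.length - 1) = 0 := by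
    rw [kmpM, Nat.findGreatest_eq_zero_iff]
    intro m hm _ hP
    simp only [List.take_zero, List.suffix_nil] at hP
    rcases List.take_eq_nil_iff.mp hP with h | h
    · omega
    · rw [h] at hn; simp at hn
  have hscan := scan_spec a (kmpBuild a [0] 0 (a.drop 1)) t hn hpi t 0 0 rfl (by omega)
    hj0.symm
    (by intro i' hi'
        have : i' = 0 := by omega
        subst this
        simp only [List.take_zero]
        intro hsuf
        have h0 : a = [] := List.suffix_nil.mp hsuf
        rw [h0] at hn
        simp at hn)
  rcases hscan with ⟨hres, hno⟩ | ⟨m, _, hm2, hres, hocc, hmin⟩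
  · rw [hres]
    have : (List.range a.length).find? (fun k => decide (b.drop k ++ b.take k = a)) = none := by
      rw [List.find?_eq_none]
      intro k hkmem
      have hk : k < a.length := List.mem_range.mp hkmem
      simp only [decide_eq_true_eq]
      intro hrot
      have hocc : a <:+ t.take (k + a.length) := (occ_iff a b hb k hk).mpr hrot
      exact hno (k + a.length) (by omega) hocc
    rw [this]
    rfl
  · have hmlb : a.length - 1 ≤ m := by
      have := hocc.length_le
      have hlt : (t.take (m+1)).length ≤ m + 1 := by simp
      omega
    set k := m + 1 - a.length with hkdef
    have hmk : m + 1 = k + a.length := by omega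
    have hklt : k < a.length := by omega
    have hrot : b.drop k ++ b.take k = a := by
      rw [← occ_iff a b hb k hklt, ← hmk]
      exact hocc
    have hmin' : ∀ j, j < k → (fun k => decide (b.drop k ++ b.take k = a)) j = false := by
      intro j hj
      simp only [decide_eq_false_iff_not]
      intro hrotj
      have hoccj : a <:+ t.take (j + a.length) := (occ_iff a b hb j (by omega)).mpr hrotj
      exact hmin (j + a.length) (by omega) hoccj
    rw [find?_range_eq_some _ _ k hklt (by simp [hrot]) hmin', hres]
    simp only [Option.map]
    have : (↑m - ↑a.length + 1 : Int) = ((m + 1 - a.length : Nat) : Int) := by omega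
    exact congrArg some this

-- shift_k_right computes the right rotation, as drop/take
lemma shiftk_eq (a : List Int) (k : Nat) (hk : k ≤ a.length) :
    shift_k_right a (k : Int) = some (a.drop (a.length - k) ++ a.take (a.length - k)) := by
  unfold shift_k_right
  rw [if_neg (by omega)]
  cases k with
  | zero =>
    have h0 : (-(((0:Nat)) : Int)) = (((0:Nat)) : Int) := by norm_num
    rw [h0, PySem.List.slice_from_natCast, PySem.List.slice_to_natCast]
    simp
  | succ m =>
    rw [PySem.List.slice_from_neg_natCast, PySem.List.slice_to_neg_natCast] <;> omega

-- right rotation of a by k equals b iff left rotation of b by k equals a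
lemma rot_iff (a b : List Int) (k : Nat) (hb : b.length = a.length) (hk : k ≤ a.length) :
    (a.drop (a.length - k) ++ a.take (a.length - k) = b) ↔ (b.drop k ++ b.take k = a) := by
  constructor
  · intro h
    subst h
    rw [List.drop_left' (by simp; omega), List.take_left' (by simp; omega),
      List.take_append_drop]
  · intro h
    subst h
    rw [List.drop_left' (by simp; omega), List.take_left' (by simp; omega),
      List.take_append_drop]

lemma loopA_eq_find? (a b : List Int) (hb : b.length = a.length) :
    ∀ ks : List Int, (∀ k ∈ ks, 0 ≤ k ∧ k ≤ (a.length : Int)) →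
      pyLoopA a b ks = ks.find? (fun k => decide (b.drop k.toNat ++ b.take k.toNat = a)) := by
  intro ks
  induction ks with
  | nil => intro _; rfl
  | cons k ks ih =>
    intro hks
    obtain ⟨hk0, hkn⟩ := hks k (List.mem_cons_self ..)
    have hkeq : ((k.toNat : Nat) : Int) = k := Int.toNat_of_nonneg hk0
    have hkle : k.toNat ≤ a.length := by omega
    simp only [pyLoopA, List.find?]
    rw [← hkeq, shiftk_eq a k.toNat hkle]
    dsimp only
    by_cases h : a.drop (a.length - k.toNat) ++ a.take (a.length - k.toNat) = b
    · have hrot : b.drop k.toNat ++ b.take k.toNat = a := (rot_iff a b k.toNat hb hkle).mp h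
      rw [if_pos h, Int.toNat_natCast]
      simp only [hrot, decide_true]
    · have hrot : ¬ (b.drop k.toNat ++ b.take k.toNat = a) :=
        fun hx => h ((rot_iff a b k.toNat hb hkle).mpr hx)
      rw [if_neg h, Int.toNat_natCast]
      simp only [hrot, decide_false]
      exact ih (fun x hx => hks x (List.mem_cons_of_mem _ hx))

lemma A_eq_find (a b : List Int) (hb : a.length = b.length) (hn : 1 ≤ a.length) :
    shift_right_size a b
      = ((List.range a.length).find? (fun k => decide (b.drop k ++ b.take k = a))).map
          (fun k => (k : Int)) := by
  unfold shift_right_size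
  rw [if_neg (by omega)]
  rw [loopA_eq_find? a b hb.symm _ (by
    intro k hk
    rw [PySem.List.mem_pyRange_one] at hk
    omega)]
  rw [PySem.List.pyRange_one]
  have h1 : (((a.length : Int) + 1) - 0).toNat = a.length + 1 := by omega
  rw [h1, List.find?_map]
  have h2 : ((fun k : Int => decide (b.drop k.toNat ++ b.take k.toNat = a)) ∘
      (fun k : Nat => (0 : Int) + k)) = fun k : Nat => decide (b.drop k ++ b.take k = a) := by
    funext k
    simp
  rw [h2]
  have h4 : (fun k : Nat => (0:Int) + (k:Nat)) = (fun k : Nat => (k : Int)) := by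
    funext k; simp
  rw [h4]
  have h3 : List.range (a.length + 1) = List.range a.length ++ [a.length] := List.range_succ
  rw [h3, List.find?_append]
  have hPn : (fun k : Nat => decide (b.drop k ++ b.take k = a)) a.length
      = (fun k : Nat => decide (b.drop k ++ b.take k = a)) 0 := by
    simp only [List.drop_zero, List.take_zero, List.append_nil]
    rw [show b.drop a.length = [] from List.drop_eq_nil_of_le (by omega),
        show b.take a.length = b from List.take_of_length_le (by omega)]
    simp
  cases hfind : (List.range a.length).find? (fun k => decide (b.drop k ++ b.take k = a)) with
  | some r =>
    simp
  | none =>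
    have hno : ∀ k, k < a.length → ¬ (b.drop k ++ b.take k = a) := by
      intro k hk hcon
      have := List.find?_eq_none.mp hfind k (List.mem_range.mpr hk)
      simp [hcon] at this
    have h0 : ¬ (b.drop a.length ++ b.take a.length = a) := by
      rw [show b.drop a.length = [] from List.drop_eq_nil_of_le (by omega),
          show b.take a.length = b from List.take_of_length_le (by omega)]
      have := hno 0 (by omega)
      simpa using this
    simp [List.find?, h0]

-- ===== VERDICT (by name: the statement is the Claim_ definition above) =====
theorem shift_right_size_spec : Claim_equal_shift_right_size := by
  intro a b _
  unfold Spec_shift_right_size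
  by_cases hlen : a.length = b.length
  · by_cases hn : a.length = 0
    · have ha : a = [] := List.eq_nil_of_length_eq_zero hn
      have hbn : b = [] := List.eq_nil_of_length_eq_zero (by omega)
      subst ha; subst hbn; decide
    · rw [A_eq_find a b hlen (by omega), alt_eq_find a b hlen (by omega)]
  · unfold shift_right_size shift_right_size_alt
    rw [if_pos hlen, if_pos hlen]
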